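-- pv_equiv track=rewrite | github.com/Sora-reader/backend | apps/parse/cleaning.py | without_common_prefix
-- ===== SOURCE A (Python) =====
-- from collections import Counter
--
-- def without_common_prefix(words):
--     """Returns the list of strings with the common prefix."""
--     cnt = Counter()
--     for word in words:
--         if not word:
--             return words
--         cnt[word[0]] += 1
--     first_letter = list(cnt)[0]
--
--     filter_list = [word for word in words if word[0] == first_letter]
--     filter_list.sort(key=lambda s: len(s))  # To avoid iob
--
--     prefix = ""
--     length = len(filter_list[0])
--     for i in range(length):
--         test = filter_list[0][i]
--         if all([word[i] == test for word in filter_list]):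
--             prefix += test
--         else:
--             break
--     return [word[len(prefix) :] if word.startswith(prefix) else word for word in words]
-- ===== SOURCE B (Python) =====
-- def without_common_prefix(words):
--     """Returns the list of strings with the common prefix."""
--     for word in words:
--         if not word:
--             return words
--     first_letter = words[0][0]
--     filter_list = [word for word in words if word[0] == first_letter]
--     lo = min(filter_list)
--     hi = max(filter_list)
--     prefix = ""
--     for i in range(len(lo)):
--         if lo[i] != hi[i]:
--             break
--         prefix += lo[i]
--     return [word[len(prefix):] if word.startswith(prefix) else word for word in words]
-- ===== Notes on version B (the rewrite author's own statement) =====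
-- stated objective: alternative
-- what changed: The counter/length-sort/column-scan LCP over all filtered words is replaced by the classic sort-endpoints LCP: take the lexicographic min and max of the filtered words and compare only those two strings character by character.
import Mathlib
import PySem

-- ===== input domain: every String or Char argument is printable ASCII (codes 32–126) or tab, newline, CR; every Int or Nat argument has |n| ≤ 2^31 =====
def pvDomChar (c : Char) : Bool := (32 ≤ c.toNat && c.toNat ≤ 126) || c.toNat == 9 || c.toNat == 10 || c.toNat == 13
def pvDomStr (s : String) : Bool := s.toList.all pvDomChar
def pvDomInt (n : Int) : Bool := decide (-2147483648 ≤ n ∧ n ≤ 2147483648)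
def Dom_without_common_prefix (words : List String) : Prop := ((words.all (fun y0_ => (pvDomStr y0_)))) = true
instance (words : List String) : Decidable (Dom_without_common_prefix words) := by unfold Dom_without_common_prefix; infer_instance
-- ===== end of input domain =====

-- B replaces A's counter + length-sort + all-words column scan by the classic sort-endpoints
-- LCP (compare only the lexicographic min and max of the filtered words); same results, no speed claim.

-- ===== PORT A =====
-- the 'for word in words: if not word: return words / cnt[word[0]] += 1' loop;
-- 'none' marks the early return (the returned value is 'words' in that case)
def aCount (words : List String) : Option (PySem.Dict Char Int) :=
  words.foldl (fun acc word => acc.bind (fun cnt =>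
    if word.toList.isEmpty then none
    else
      let c := (PySem.Str.pyGet? word 0).getD ' '   -- word[0]; word is nonempty here
      some (cnt.insert c (cnt.getD c 0 + 1)))) (some PySem.Dict.empty)

-- 'for i in range(length): test = filter_list[0][i]; if all(word[i] == test …): prefix += test else break'
-- word[i] is in range for every word of the length-sorted filter_list, so 'pyGet? … == some test' is exact
def aScan (fl : List String) (w0 : List Char) (i : Nat) : List Char :=
  if h : i < w0.length then
    if fl.all (fun word => PySem.Str.pyGet? word (i : Int) == some w0[i])
    then w0[i] :: aScan fl w0 (i + 1)
    else []
  else []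
termination_by w0.length - i

def without_common_prefix (words : List String) : List String :=
  match aCount words with
  | none => words                                 -- some word was empty: 'return words'
  | some cnt =>
    match cnt.keys.head? with                     -- list(cnt)[0]
    | none => words                               -- Python: IndexError on empty 'words'; excluded by Pre_
    | some first_letter =>
      let filter_list := words.filter (fun word => PySem.Str.pyGet? word 0 == some first_letter)
      let fl := PySem.List.sorted filter_list (fun s => PySem.Str.len s) false
      let w0 := (fl.headD "").toList              -- filter_list[0]; nonempty whenever words is
      let pre := aScan fl w0 0
      words.map (fun word =>
        if PySem.Str.startswith word (String.ofList pre)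
        then PySem.Str.slice word (some (pre.length : Int)) none
        else word)

-- ===== PORT B =====
-- 'for i in range(len(lo)): if lo[i] != hi[i]: break / prefix += lo[i]';
-- hi[i] is in range whenever the loop reaches i, so 'pyGet? … == some lo[i]' is exact
def bScan (lo hi : List Char) (i : Nat) : List Char :=
  if h : i < lo.length then
    if PySem.List.pyGet? hi (i : Int) == some lo[i]
    then lo[i] :: bScan lo hi (i + 1)
    else []
  else []
termination_by lo.length - i

def without_common_prefix_alt (words : List String) : List String :=
  if words.any (fun word => word.toList.isEmpty) then words   -- the early-return loop
  else
    match words with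
    | [] => words        -- Python: IndexError at words[0][0]; excluded by Pre_
    | w :: _ =>
      let first_letter := (PySem.Str.pyGet? w 0).getD ' '     -- words[0][0]; w is nonempty here
      let filter_list := words.filter (fun word => PySem.Str.pyGet? word 0 == some first_letter)
      match PySem.List.min? filter_list (fun s => s), PySem.List.max? filter_list (fun s => s) with
      | some lo, some hi =>
        let pre := bScan lo.toList hi.toList 0
        words.map (fun word =>
          if PySem.Str.startswith word (String.ofList pre)
          then PySem.Str.slice word (some (pre.length : Int)) none
          else word)
      | _, _ => words    -- unreachable: filter_list contains words[0]

-- ===== PRECONDITION & SPEC =====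
-- Pre_ excludes only the empty list, on which A raises IndexError at 'list(cnt)[0]' (and B at 'words[0][0]')
def Pre_without_common_prefix (words : List String) : Prop := words ≠ []
instance (words : List String) : Decidable (Pre_without_common_prefix words) := by unfold Pre_without_common_prefix; infer_instance
def pvWitness_without_common_prefix : List String := ["apple", "april", "banana"]

def Spec_without_common_prefix (words : List String) (out : List String) : Prop := out = without_common_prefix_alt words
instance (words : List String) (out : List String) : Decidable (Spec_without_common_prefix words out) := by unfold Spec_without_common_prefix; infer_instance

-- ===== CLAIM (what is proved, stated in full; the proofs are below) =====
def Claim_equal_without_common_prefix : Prop := ∀ (words : List String), Dom_without_common_prefix words → Pre_without_common_prefix words → Spec_without_common_prefix words (without_common_prefix words)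

-- ===== LEMMAS AND PROOFS =====

-- the longest common prefix of two lists, structurally (proof-side characterisation of bScan)
def lcp2 : List Char → List Char → List Char
  | a :: as, b :: bs => if a = b then a :: lcp2 as bs else []
  | _, _ => []

theorem bScan_eq_lcp2 (lo hi : List Char) (i : Nat) :
    bScan lo hi i = lcp2 (lo.drop i) (hi.drop i) := by
  rw [bScan]
  by_cases h : i < lo.length
  · rw [dif_pos h, List.drop_eq_getElem_cons h]
    by_cases h2 : i < hi.length
    · rw [List.drop_eq_getElem_cons h2]
      have hg : PySem.List.pyGet? hi (i : Int) = some hi[i] := by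
        simp [PySem.List.pyGet?_natCast, List.getElem?_eq_getElem h2]
      rw [hg, bScan_eq_lcp2 lo hi (i + 1)]
      simp only [lcp2]
      by_cases he : lo[i] = hi[i]
      · simp [he]
      · simp [he, Ne.symm he]
    · have h2' : hi.length ≤ i := Nat.le_of_not_lt h2
      have hd : hi.drop i = [] := List.drop_eq_nil_of_le h2'
      have hg : PySem.List.pyGet? hi (i : Int) = none := by
        rw [PySem.List.pyGet?_natCast]
        exact List.getElem?_eq_none h2' 
      rw [hg, hd]
      simp [lcp2]
  · rw [dif_neg h, List.drop_eq_nil_of_le (Nat.le_of_not_lt h)]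
    simp [lcp2]
termination_by lo.length - i

theorem lcp2_prefix_left (a b : List Char) : lcp2 a b <+: a := by
  induction a generalizing b with
  | nil => simp [lcp2]
  | cons x xs ih =>
    cases b with
    | nil => simp [lcp2]
    | cons y ys =>
      simp only [lcp2]
      split_ifs with h
      · exact List.cons_prefix_cons.mpr ⟨rfl, ih ys⟩
      · exact List.nil_prefix

theorem lcp2_prefix_right (a b : List Char) : lcp2 a b <+: b := by
  induction a generalizing b with
  | nil => simp [lcp2]
  | cons x xs ih =>
    cases b with
    | nil => simp [lcp2]
    | cons y ys =>
      simp only [lcp2]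
      split_ifs with h
      · exact List.cons_prefix_cons.mpr ⟨h, ih ys⟩
      · exact List.nil_prefix

theorem prefix_lcp2 (p a b : List Char) (ha : p <+: a) (hb : p <+: b) : p <+: lcp2 a b := by
  induction p generalizing a b with
  | nil => exact List.nil_prefix
  | cons c p' ih =>
    obtain ⟨ta, rfl⟩ := ha
    obtain ⟨tb, hb'⟩ := hb
    cases b with
    | nil => simp at hb'
    | cons y ys =>
      rw [List.cons_append] at hb'
      obtain ⟨rfl, hys⟩ := List.cons.inj hb'
      simp only [List.cons_append, lcp2]
      exact List.cons_prefix_cons.mpr ⟨rfl, ih _ _ (List.prefix_append _ _) ⟨tb, hys⟩⟩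

theorem cons_le_elim {c d : Char} {l1 l2 : List Char} (h : (c :: l1) ≤ (d :: l2)) :
    c < d ∨ (c = d ∧ l1 ≤ l2) := by
  rcases lt_or_eq_of_le h with h | h
  · cases (h : List.Lex (· < ·) (c :: l1) (d :: l2)) with
    | cons h => exact Or.inr ⟨rfl, le_of_lt h⟩
    | rel h => exact Or.inl h
  · injection h with h1 h2
    exact Or.inr ⟨h1, le_of_eq h2⟩

theorem not_cons_le_nil {c : Char} {l : List Char} (h : (c :: l) ≤ ([] : List Char)) : False := by
  rcases lt_or_eq_of_le h with h | h
  · cases (h : List.Lex (· < ·) (c :: l) [])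
  · simp at h

-- any common prefix of the lexicographic endpoints is a prefix of everything in between
theorem sandwich (p : List Char) : ∀ (a b w : List Char), p <+: a → p <+: b →
    a ≤ w → w ≤ b → p <+: w := by
  induction p with
  | nil => intro a b w _ _ _ _; exact List.nil_prefix
  | cons c p' ih =>
    intro a b w ha hb haw hwb
    obtain ⟨ta, rfl⟩ := ha
    obtain ⟨tb, rfl⟩ := hb
    cases w with
    | nil => exact absurd haw (fun h => not_cons_le_nil (by simpa using h))
    | cons d w' =>
      rw [List.cons_append] at haw hwb
      rcases cons_le_elim haw with h1 | ⟨rfl, h1⟩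
      · rcases cons_le_elim hwb with h2 | ⟨rfl, h2⟩
        · exact absurd (h1.trans h2) (lt_irrefl _)
        · exact absurd h1 (lt_irrefl _)
      · rcases cons_le_elim hwb with h2 | ⟨_, h2⟩
        · exact absurd h2 (lt_irrefl _)
        · exact List.cons_prefix_cons.mpr
            ⟨rfl, ih _ _ _ (List.prefix_append _ _) (List.prefix_append _ _) h1 h2⟩

theorem scanA_prefix_all (fl : List String) (w0 : List Char) (i : Nat) :
    ∀ w ∈ fl, aScan fl w0 i <+: w.toList.drop i := by
  intro w hw
  rw [aScan]
  by_cases h : i < w0.length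
  · rw [dif_pos h]
    by_cases hall : fl.all (fun word => PySem.Str.pyGet? word (i : Int) == some w0[i]) = true
    · rw [if_pos hall]
      have hwi : w.toList[i]? = some w0[i] := by
        have := List.all_eq_true.mp hall w hw
        simpa [PySem.List.pyGet?_natCast] using this
      have hlt : i < w.toList.length := by
        by_contra hc
        rw [List.getElem?_eq_none (Nat.le_of_not_lt hc)] at hwi
        simp at hwi
      have : w.toList.drop i = w0[i] :: w.toList.drop (i + 1) := by
        rw [List.drop_eq_getElem_cons hlt]
        congr 1
        exact Option.some.inj (by rw [← List.getElem?_eq_getElem hlt, hwi])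
      rw [this]
      exact List.cons_prefix_cons.mpr ⟨rfl, scanA_prefix_all fl w0 (i + 1) w hw⟩
    · rw [if_neg hall]
      exact List.nil_prefix
  · rw [dif_neg h]
    exact List.nil_prefix
termination_by w0.length - i

theorem scanA_greatest (fl : List String) (w0 : List Char) :
    ∀ (q : List Char) (i : Nat), q <+: w0.drop i → (∀ w ∈ fl, q <+: w.toList.drop i) →
    q <+: aScan fl w0 i := by
  intro q
  induction q with
  | nil => intro i _ _; exact List.nil_prefix
  | cons c q' ih =>
    intro i h0 hall
    have hlt : i < w0.length := by
      by_contra hc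
      rw [List.drop_eq_nil_of_le (by omega)] at h0
      exact absurd (List.prefix_nil.mp h0) (List.cons_ne_nil c q')
    rw [List.drop_eq_getElem_cons hlt] at h0
    obtain ⟨rfl, h0'⟩ := List.cons_prefix_cons.mp h0
    rw [aScan, dif_pos hlt]
    have hcond : fl.all (fun word => PySem.Str.pyGet? word (i : Int) == some w0[i]) = true := by
      apply List.all_eq_true.mpr
      intro w hw
      have hq := hall w hw
      have hlt2 : i < w.toList.length := by
        by_contra hc
        rw [List.drop_eq_nil_of_le (by omega)] at hq
        exact absurd (List.prefix_nil.mp hq) (List.cons_ne_nil _ q')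
      rw [List.drop_eq_getElem_cons hlt2] at hq
      obtain ⟨hh, _⟩ := List.cons_prefix_cons.mp hq
      simp [PySem.List.pyGet?_natCast, List.getElem?_eq_getElem hlt2, hh]
    rw [if_pos hcond]
    apply List.cons_prefix_cons.mpr
    refine ⟨rfl, ih (i + 1) h0' ?_⟩
    intro w hw
    have hq := hall w hw
    have hlt2 : i < w.toList.length := by
      by_contra hc
      rw [List.drop_eq_nil_of_le (by omega)] at hq
      exact absurd (List.prefix_nil.mp hq) (List.cons_ne_nil _ q')
    rw [List.drop_eq_getElem_cons hlt2] at hq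
    exact (List.cons_prefix_cons.mp hq).2

theorem aCountStep_from_none (words : List String) :
    words.foldl (fun acc word => acc.bind (fun cnt : PySem.Dict Char Int =>
      if word.toList.isEmpty then none
      else
        let c := (PySem.Str.pyGet? word 0).getD ' '
        some (cnt.insert c (cnt.getD c 0 + 1)))) none = none := by
  induction words with
  | nil => rfl
  | cons w rest ih => simpa using ih

theorem aCount_fold (words : List String) (d : PySem.Dict Char Int) :
    words.foldl (fun acc word => acc.bind (fun cnt : PySem.Dict Char Int =>
      if word.toList.isEmpty then none
      else
        let c := (PySem.Str.pyGet? word 0).getD ' '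
        some (cnt.insert c (cnt.getD c 0 + 1)))) (some d) =
    (if words.any (fun word => word.toList.isEmpty) then none else
      some (words.foldl (fun cnt word =>
        let c := (PySem.Str.pyGet? word 0).getD ' '
        cnt.insert c (cnt.getD c 0 + 1)) d)) := by
  induction words generalizing d with
  | nil => rfl
  | cons w rest ih =>
    by_cases hw : w.toList.isEmpty
    · simp only [List.foldl_cons, List.any_cons, hw, Option.bind_some,
        Bool.true_or, if_true]
      exact aCountStep_from_none rest
    · simp only [List.foldl_cons, List.any_cons, Option.bind_some, if_neg hw]
      rw [ih]
      simp [hw]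

theorem aCount_none_of_any_empty (words : List String)
    (h : words.any (fun word => word.toList.isEmpty) = true) : aCount words = none := by
  rw [aCount, aCount_fold, if_pos h]

theorem aCount_some_of_all_nonempty (words : List String)
    (h : words.any (fun word => word.toList.isEmpty) = false) :
    aCount words = some (words.foldl (fun cnt word =>
      let c := (PySem.Str.pyGet? word 0).getD ' '
      cnt.insert c (cnt.getD c 0 + 1)) PySem.Dict.empty) := by
  rw [aCount, aCount_fold, if_neg (by simp [h])]

theorem head?_foldl_add (l : List Char) (s : PySem.Set Char) (hs : s ≠ []) :
    (l.foldl PySem.Set.add s).head? = s.head? := by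
  induction l generalizing s with
  | nil => rfl
  | cons x xs ih =>
    rw [List.foldl_cons]
    have hne : PySem.Set.add s x ≠ [] := by
      rw [PySem.Set.add_eq_ite]
      split_ifs with h
      · exact hs
      · simp
    rw [ih _ hne, PySem.Set.add_eq_ite]
    split_ifs with h
    · rfl
    · obtain ⟨a, s', rfl⟩ := List.exists_cons_of_ne_nil hs
      rfl

theorem keys_head_aCount (w : String) (rest : List String)
    (h : (w :: rest).any (fun word => word.toList.isEmpty) = false) :
    ∃ cnt, aCount (w :: rest) = some cnt ∧
      cnt.keys.head? = some ((PySem.Str.pyGet? w 0).getD ' ') := by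
  refine ⟨_, aCount_some_of_all_nonempty _ h, ?_⟩
  rw [PySem.Dict.keys_foldl_insert_key (key := fun word => (PySem.Str.pyGet? word 0).getD ' ')
      (f := fun cnt word => cnt.getD ((PySem.Str.pyGet? word 0).getD ' ') 0 + 1)]
  show (PySem.Set.update PySem.Dict.empty.keys
      ((w :: rest).map (fun word => (PySem.Str.pyGet? word 0).getD ' '))).head? = _
  rw [PySem.Set.update, List.map_cons, List.foldl_cons]
  rw [head?_foldl_add _ _ (by simp [PySem.Set.add, PySem.Dict.empty])]
  rfl

theorem main_eq (words : List String) (hpre : words ≠ []) :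
    without_common_prefix words = without_common_prefix_alt words := by
  by_cases hany : words.any (fun word => word.toList.isEmpty) = true
  · unfold without_common_prefix without_common_prefix_alt
    rw [aCount_none_of_any_empty _ hany, if_pos hany]
  · obtain ⟨w, rest, rfl⟩ : ∃ w rest, words = w :: rest := by
      cases words with
      | nil => exact absurd rfl hpre
      | cons w rest => exact ⟨w, rest, rfl⟩
    have hany' : (w :: rest).any (fun word => word.toList.isEmpty) = false :=
      Bool.eq_false_iff.mpr hany
    obtain ⟨cnt, hc, hk⟩ := keys_head_aCount w rest hany'
    have hwne : w.toList ≠ [] := by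
      have h2 := hany'
      simp only [List.any_cons, Bool.or_eq_false_iff] at h2
      simpa using h2.1
    obtain ⟨ch, wt, hwt⟩ := List.exists_cons_of_ne_nil hwne
    have hget : PySem.Str.pyGet? w 0 = some ch := by
      simp [hwt]
    have hpredw : (PySem.Str.pyGet? w 0 == some ((PySem.Str.pyGet? w 0).getD ' ')) = true := by
      rw [hget]; simp
    have hmemw : w ∈ (w :: rest).filter
        (fun word => PySem.Str.pyGet? word 0 == some ((PySem.Str.pyGet? w 0).getD ' ')) := by
      apply List.mem_filter.mpr
      exact ⟨List.mem_cons_self, hpredw⟩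
    have hfltne : (w :: rest).filter
        (fun word => PySem.Str.pyGet? word 0 == some ((PySem.Str.pyGet? w 0).getD ' ')) ≠ [] :=
      List.ne_nil_of_mem hmemw
    rcases hlo : PySem.List.min? ((w :: rest).filter
        (fun word => PySem.Str.pyGet? word 0 == some ((PySem.Str.pyGet? w 0).getD ' ')))
        (fun s => s) with _ | lo
    · rw [PySem.List.min?_eq_none_iff] at hlo
      exact absurd hlo hfltne
    rcases hhi : PySem.List.max? ((w :: rest).filter
        (fun word => PySem.Str.pyGet? word 0 == some ((PySem.Str.pyGet? w 0).getD ' ')))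
        (fun s => s) with _ | hi
    · rw [PySem.List.max?_eq_none_iff] at hhi
      exact absurd hhi hfltne
    -- names for the two sides' data
    have hloM : lo ∈ (w :: rest).filter
        (fun word => PySem.Str.pyGet? word 0 == some ((PySem.Str.pyGet? w 0).getD ' ')) :=
      PySem.List.min?_mem hlo
    have hhiM : hi ∈ (w :: rest).filter
        (fun word => PySem.Str.pyGet? word 0 == some ((PySem.Str.pyGet? w 0).getD ' ')) :=
      PySem.List.max?_mem hhi
    have hfl_ne : PySem.List.sorted ((w :: rest).filter
        (fun word => PySem.Str.pyGet? word 0 == some ((PySem.Str.pyGet? w 0).getD ' ')))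
        (fun s => PySem.Str.len s) false ≠ [] := by
      intro hnil
      rw [PySem.List.sorted_eq_nil_iff] at hnil
      exact hfltne hnil
    obtain ⟨x, fl', hflx⟩ := List.exists_cons_of_ne_nil hfl_ne
    have hxmem : x ∈ (w :: rest).filter
        (fun word => PySem.Str.pyGet? word 0 == some ((PySem.Str.pyGet? w 0).getD ' ')) := by
      have : x ∈ PySem.List.sorted ((w :: rest).filter
          (fun word => PySem.Str.pyGet? word 0 == some ((PySem.Str.pyGet? w 0).getD ' ')))
          (fun s => PySem.Str.len s) false := by rw [hflx]; exact List.mem_cons_self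
      exact (PySem.List.mem_sorted _ _ _ _).mp this
    -- the two prefixes agree
    have key : aScan (PySem.List.sorted ((w :: rest).filter
          (fun word => PySem.Str.pyGet? word 0 == some ((PySem.Str.pyGet? w 0).getD ' ')))
          (fun s => PySem.Str.len s) false)
        (((PySem.List.sorted ((w :: rest).filter
          (fun word => PySem.Str.pyGet? word 0 == some ((PySem.Str.pyGet? w 0).getD ' ')))
          (fun s => PySem.Str.len s) false).headD "").toList) 0
        = bScan lo.toList hi.toList 0 := by
      set FL := (w :: rest).filter
        (fun word => PySem.Str.pyGet? word 0 == some ((PySem.Str.pyGet? w 0).getD ' ')) with hFL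
      set SL := PySem.List.sorted FL (fun s => PySem.Str.len s) false with hSL
      have hhead : (SL.headD "") = x := by rw [hflx]; rfl
      rw [hhead, bScan_eq_lcp2, List.drop_zero, List.drop_zero]
      have hAcp : ∀ u ∈ FL, aScan SL x.toList 0 <+: u.toList := by
        intro u hu
        have := scanA_prefix_all SL x.toList 0 u ((PySem.List.mem_sorted _ _ _ _).mpr hu)
        simpa using this
      have hBcp : ∀ u ∈ FL, lcp2 lo.toList hi.toList <+: u.toList := by
        intro u hu
        exact sandwich _ lo.toList hi.toList u.toList
          (lcp2_prefix_left _ _) (lcp2_prefix_right _ _)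
          (String.le_iff_toList_le.mp (PySem.List.min?_isMin hlo u hu))
          (String.le_iff_toList_le.mp (PySem.List.max?_isMax hhi u hu))
      have hAB : aScan SL x.toList 0 <+: lcp2 lo.toList hi.toList :=
        prefix_lcp2 _ _ _ (hAcp lo hloM) (hAcp hi hhiM)
      have hBA : lcp2 lo.toList hi.toList <+: aScan SL x.toList 0 := by
        apply scanA_greatest
        · simpa using hBcp x hxmem
        · intro u hu
          simpa using hBcp u ((PySem.List.mem_sorted _ _ _ _).mp hu)
      exact hAB.eq_of_length (Nat.le_antisymm hAB.length_le hBA.length_le)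
    unfold without_common_prefix without_common_prefix_alt
    rw [hc]
    simp only [hk, hany', Bool.false_eq_true, if_false, hlo, hhi, key]

theorem without_common_prefix_spec : Claim_equal_without_common_prefix := by
  intro words _ hpre
  rw [Spec_without_common_prefix]
  exact main_eq words hpre
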